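-- pv_equiv track=rewrite | github.com/hyeonjun/AlgorithmTest | ProGrammers/Lv3/level_3_Shuttle_Bus.py | solution
-- ===== SOURCE A (Python) =====
-- def solution(n, t, m, timetable):
--     crew = [int(tb[:2]) * 60 + int(tb[3:]) for tb in timetable]
--     crew.sort()
--
--     bus = [[540 + t * i, 0, None] for i in range(n)]
--
--     bi, ci = 0, 0
--     while ci < len(crew):
--         c = crew[ci]
--         if bi == len(bus):
--             break
--         if c <= bus[bi][0] and bus[bi][1] < m:
--             bus[bi][1] += 1
--             bus[bi][2] = c
--             ci += 1
--         else:
--             bi += 1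
--     answer = bus[-1][0]
--     if bus[-1][2] != None and bus[-1][1] == m:
--         answer = bus[-1][2] - 1
--     return '%02d:%02d' % (answer // 60, answer % 60)
-- ===== SOURCE B (Python) =====
-- def solution(n, t, m, timetable):
--     crew = sorted(int(tb[:2]) * 60 + int(tb[3:]) for tb in timetable)
--
--     def reachable(T, k):
--         # first index >= k whose arrival time exceeds T (binary search on sorted crew)
--         lo, hi = k, len(crew)
--         while lo < hi:
--             mid = (lo + hi) // 2
--             if crew[mid] <= T:
--                 lo = mid + 1
--             else:
--                 hi = mid
--         return lo
--
--     k = 0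
--     for i in range(n - 1):
--         k = min(k + m, reachable(540 + t * i, k))
--     T = 540 + t * (n - 1)
--     boarders = min(m, reachable(T, k) - k)
--     ans = crew[k + boarders - 1] - 1 if boarders == m else T
--     return '%02d:%02d' % (ans // 60, ans % 60)
-- ===== Notes on version B (the rewrite author's own statement) =====
-- stated objective: alternative
-- what changed: A simulates boarding with a merged two-pointer while-loop mutating a bus table one crew member at a time; B sorts the crew once and, per bus, advances the boarding index arithmetically by min(k+m, bisect_right(crew, bus_time, k)) via a hand-rolled binary search, then reads the answer off the sorted list in closed form; Pre_ excludes n < 1 and unparseable timetable entries (A raises there) and non-positive capacity m < 1, which is outside the problem's natural domain (capacity is a positive seat count).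
-- outside the precondition, e.g. on solution(1, 1, 0, ['09:00']): A returns '09:00', B returns '08:59'
import Mathlib
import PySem

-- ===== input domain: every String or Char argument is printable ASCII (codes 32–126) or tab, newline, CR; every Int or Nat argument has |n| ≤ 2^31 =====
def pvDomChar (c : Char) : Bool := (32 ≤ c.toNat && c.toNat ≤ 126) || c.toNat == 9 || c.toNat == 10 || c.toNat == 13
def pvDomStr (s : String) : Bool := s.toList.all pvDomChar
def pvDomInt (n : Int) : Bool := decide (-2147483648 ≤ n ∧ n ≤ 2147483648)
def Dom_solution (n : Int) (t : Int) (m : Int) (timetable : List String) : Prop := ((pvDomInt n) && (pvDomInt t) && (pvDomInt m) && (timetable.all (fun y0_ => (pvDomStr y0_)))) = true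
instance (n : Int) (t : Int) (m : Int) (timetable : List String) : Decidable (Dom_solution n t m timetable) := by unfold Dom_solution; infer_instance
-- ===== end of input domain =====

-- B replaces A's merged two-pointer walk over a mutable bus table by per-bus arithmetic:
-- a hand-rolled binary search counts how many waiting crew can catch each bus, the boarding
-- index advances by min(k+m, bound), and the answer is read off the sorted list in closed form
-- (objective: alternative decomposition, same exact output on Pre_).

-- ===== PORT A =====
-- shared front end of both Pythons: int(tb[:2]) * 60 + int(tb[3:])
def pvParse (tb : String) : Int :=
  ((PySem.Int.ofStr? (PySem.Str.slice tb none (some 2))).getD 0) * 60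
    + (PySem.Int.ofStr? (PySem.Str.slice tb (some 3) none)).getD 0

-- termination facts for the loops, named so their proof terms stay small and shared
theorem pvALoopDec1 {α : Type} (bus : List α) (x : α) (bi ci cl : Nat) (h : ci < cl) :
    cl - (ci + 1) + ((bus.set bi x).length - bi) < cl - ci + (bus.length - bi) := by
  simp only [List.length_set]; omega

theorem pvALoopDec2 (bl bi ci cl : Nat) (h : bi < bl) :
    cl - ci + (bl - (bi + 1)) < cl - ci + (bl - bi) := by omega

-- A's while loop; the `bus.length ≤ bi` guard is Python's `bi == len(bus)` test made total
def pvALoop (m : Int) (crew : List Int) (bus : List (Int × Int × Option Int)) (bi ci : Nat) :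
    List (Int × Int × Option Int) :=
  if hci : ci < crew.length then
    if hbi : bus.length ≤ bi then bus
    else
      let c := crew[ci]
      let b := bus[bi]'(Nat.lt_of_not_le hbi)
      if c ≤ b.1 ∧ b.2.1 < m then
        pvALoop m crew (bus.set bi (b.1, b.2.1 + 1, some c)) bi (ci + 1)
      else
        pvALoop m crew bus (bi + 1) ci
  else bus
termination_by (crew.length - ci) + (bus.length - bi)
decreasing_by
  · exact pvALoopDec1 bus _ bi ci crew.length hci
  · exact pvALoopDec2 bus.length bi ci crew.length (Nat.lt_of_not_le hbi)

-- '%02d:%02d' % (x // 60, x % 60)  ('%02d' = zero-pad to width 2, sign first: zfill 2)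
def pvFmt (answer : Int) : String :=
  PySem.Str.zfill (PySem.Int.toStr (PySem.Int.floordiv answer 60)) 2 ++ ":" ++
    PySem.Str.zfill (PySem.Int.toStr (PySem.Int.mod answer 60)) 2

def solution (n : Int) (t : Int) (m : Int) (timetable : List String) : String :=
  let crew := PySem.List.sorted (timetable.map pvParse) (fun x => x)
  let bus := (PySem.List.pyRange 0 n).map (fun i => (540 + t * i, (0 : Int), (none : Option Int)))
  let bus := pvALoop m crew bus 0 0
  let last := (PySem.List.pyGet? bus (-1)).getD (0, 0, none)
  let answer := if last.2.2 ≠ none ∧ last.2.1 = m then (last.2.2.getD 0) - 1 else last.1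
  pvFmt answer

-- ===== PORT B =====
theorem pvBisectDec1 {lo hi : Nat} (h : lo < hi) : hi - ((lo + hi) / 2 + 1) < hi - lo := by omega
theorem pvBisectDec2 {lo hi : Nat} (h : lo < hi) : (lo + hi) / 2 - lo < hi - lo := by omega

-- Source B's hand-rolled `reachable` binary search on crew[lo:hi]; indices are naturals
-- (under Pre_ (1 ≤ m) every index Source B forms is nonnegative)
def pvBisect (crew : List Int) (T : Int) (lo hi : Nat) : Nat :=
  if h : lo < hi then
    let mid := (lo + hi) / 2
    if crew.getD mid 0 ≤ T then pvBisect crew T (mid + 1) hi else pvBisect crew T lo mid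
  else lo
termination_by hi - lo
decreasing_by
  · exact pvBisectDec1 h
  · exact pvBisectDec2 h

def solution_alt (n : Int) (t : Int) (m : Int) (timetable : List String) : String :=
  let crew := PySem.List.sorted (timetable.map pvParse) (fun x => x)
  let k := (PySem.List.pyRange 0 (n - 1)).foldl
    (fun k i => min (k + m.toNat) (pvBisect crew (540 + t * i) k crew.length)) 0
  let T := 540 + t * (n - 1)
  let boarders := min m (((pvBisect crew T k crew.length : Nat) : Int) - (k : Int))
  let ans := if boarders = m
    then (PySem.List.pyGet? crew ((k : Int) + boarders - 1)).getD 0 - 1 else T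
  pvFmt ans

-- ===== PRECONDITION & SPEC =====
-- Pre_ excludes exactly: n < 1 (bus[-1] on an empty bus list is an IndexError in A) and
-- timetable entries where int(tb[:2]) or int(tb[3:]) is a ValueError; and m < 1, a
-- non-positive seat capacity, which lies outside the problem's natural domain (A still
-- returns the bus departure time there).
def Pre_solution (n : Int) (t : Int) (m : Int) (timetable : List String) : Prop :=
  1 ≤ n ∧ 1 ≤ m ∧ ∀ tb ∈ timetable,
    (PySem.Int.ofStr? (PySem.Str.slice tb none (some 2))).isSome = true ∧
    (PySem.Int.ofStr? (PySem.Str.slice tb (some 3) none)).isSome = true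
instance (n : Int) (t : Int) (m : Int) (timetable : List String) : Decidable (Pre_solution n t m timetable) := by unfold Pre_solution; infer_instance

def pvWitness_solution : Int × Int × Int × List String := (2, 10, 1, ["08:00", "09:10"])

def Spec_solution (n : Int) (t : Int) (m : Int) (timetable : List String) (out : String) : Prop := out = solution_alt n t m timetable
instance (n : Int) (t : Int) (m : Int) (timetable : List String) (out : String) : Decidable (Spec_solution n t m timetable out) := by unfold Spec_solution; infer_instance

-- ===== CLAIM (what is proved, stated in full; the proofs are below) =====
def Claim_equal_solution : Prop := ∀ (n : Int) (t : Int) (m : Int) (timetable : List String), Dom_solution n t m timetable → Pre_solution n t m timetable → Spec_solution n t m timetable (solution n t m timetable)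

-- ===== LEMMAS AND PROOFS =====

-- number of still-waiting crew (sorted, from index k on) with arrival ≤ T
def pvLB (crew : List Int) (k : Nat) (T : Int) : Nat :=
  ((crew.drop k).takeWhile (fun c => decide (c ≤ T))).length

theorem tw_elem {l : List Int} {p : Int → Bool} {j : Nat}
    (h : j < (l.takeWhile p).length) : j < l.length ∧ p (l.getD j 0) = true := by
  induction l generalizing j with
  | nil => simp at h
  | cons a l ih =>
    by_cases hp : p a
    · simp [List.takeWhile_cons, hp] at h
      cases j with
      | zero => simpa [hp]
      | succ j =>
        have := ih (j := j) (by omega)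
        simpa using this
    · simp [List.takeWhile_cons, hp] at h

theorem tw_stop {l : List Int} {p : Int → Bool}
    (h : (l.takeWhile p).length < l.length) : p (l.getD (l.takeWhile p).length 0) = false := by
  induction l with
  | nil => simp at h
  | cons a l ih =>
    by_cases hp : p a
    · simp only [List.takeWhile_cons, hp, if_true, List.length_cons] at h ⊢
      simpa using ih (by omega)
    · simpa [List.takeWhile_cons, hp]

theorem getD_drop (crew : List Int) (k j : Nat) :
    (crew.drop k).getD j 0 = crew.getD (k + j) 0 := by
  simp [List.getD_eq_getElem?_getD, List.getElem?_drop]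

theorem pvLB_le (crew : List Int) (k : Nat) (T : Int) : pvLB crew k T ≤ crew.length - k := by
  have := (List.takeWhile_sublist (l := crew.drop k) (fun c => decide (c ≤ T))).length_le
  simp only [List.length_drop] at this
  simpa [pvLB] using this

theorem pvLB_elem {crew : List Int} {k : Nat} {T : Int} {j : Nat} (h : j < pvLB crew k T) :
    k + j < crew.length ∧ crew.getD (k + j) 0 ≤ T := by
  have := tw_elem (l := crew.drop k) (p := fun c => decide (c ≤ T)) (j := j) h
  rw [getD_drop] at this
  simp only [List.length_drop] at this
  constructor
  · omega
  · simpa using this.2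

theorem pvLB_stop {crew : List Int} {k : Nat} {T : Int} (h : k + pvLB crew k T < crew.length) :
    T < crew.getD (k + pvLB crew k T) 0 := by
  unfold pvLB at h ⊢
  have hlen : ((crew.drop k).takeWhile (fun c => decide (c ≤ T))).length < (crew.drop k).length := by
    simp only [List.length_drop]; omega
  have := tw_stop hlen
  rw [getD_drop] at this
  simpa using this

theorem pvLB_cons {crew : List Int} {ci : Nat} {T : Int} (h : ci < crew.length)
    (hc : crew.getD ci 0 ≤ T) : pvLB crew ci T = pvLB crew (ci + 1) T + 1 := by
  have hd : crew.drop ci = crew.getD ci 0 :: crew.drop (ci + 1) := by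
    rw [List.getD_eq_getElem crew 0 h]
    exact List.drop_eq_getElem_cons h
  rw [List.getD_eq_getElem?_getD] at hc
  simp [pvLB, hd, List.takeWhile_cons, hc]

theorem pvLB_zero_of_gt {crew : List Int} {ci : Nat} {T : Int} (h : ci < crew.length)
    (hc : T < crew.getD ci 0) : pvLB crew ci T = 0 := by
  have hd : crew.drop ci = crew.getD ci 0 :: crew.drop (ci + 1) := by
    rw [List.getD_eq_getElem crew 0 h]
    exact List.drop_eq_getElem_cons h
  rw [List.getD_eq_getElem?_getD] at hc
  simp [pvLB, hd, List.takeWhile_cons, not_le.mpr hc]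

theorem pvLB_zero_of_ge {crew : List Int} {ci : Nat} {T : Int} (h : crew.length ≤ ci) :
    pvLB crew ci T = 0 := by
  simp [pvLB, List.drop_eq_nil_of_le h]

def pvD (mm : Nat) (crew : List Int) (k : Nat) (T : Int) : Nat := min mm (pvLB crew k T)

def pvRunA (mm : Nat) (crew : List Int) : List Int → Nat → Nat
  | [], k => k
  | T :: Ts, k => pvRunA mm crew Ts (k + pvD mm crew k T)

theorem pvBisect_spec (crew : List Int) (T : Int)
    (hmono : ∀ i j, i ≤ j → j < crew.length → crew.getD i 0 ≤ crew.getD j 0) :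
    ∀ lo hi, lo ≤ hi → hi ≤ crew.length →
      lo ≤ pvBisect crew T lo hi ∧ pvBisect crew T lo hi ≤ hi ∧
      (∀ j, lo ≤ j → j < pvBisect crew T lo hi → crew.getD j 0 ≤ T) ∧
      (∀ j, pvBisect crew T lo hi ≤ j → j < hi → T < crew.getD j 0) := by
  intro lo hi
  induction lo, hi using pvBisect.induct crew T with
  | case1 lo hi h mid hle ih =>
    intro h1 h2
    have hmid : lo ≤ mid ∧ mid < hi := by have hm : mid = (lo + hi) / 2 := rfl; omega
    rw [pvBisect]
    simp only [dif_pos h]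
    rw [if_pos (show crew.getD ((lo + hi) / 2) 0 ≤ T from hle)]
    obtain ⟨i1, i2, i3, i4⟩ := ih (by omega) (by omega)
    rw [show mid = (lo + hi) / 2 from rfl] at i1 i2 i3 i4
    refine ⟨by omega, i2, ?_, i4⟩
    intro j hj1 hj2
    by_cases hj : mid + 1 ≤ j
    · exact i3 j hj hj2
    · calc crew.getD j 0 ≤ crew.getD mid 0 := hmono j mid (by omega) (by omega)
        _ ≤ T := hle
  | case2 lo hi h mid hgt ih =>
    intro h1 h2
    have hmid : lo ≤ mid ∧ mid < hi := by have hm : mid = (lo + hi) / 2 := rfl; omega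
    rw [pvBisect]
    simp only [dif_pos h]
    rw [if_neg (show ¬ crew.getD ((lo + hi) / 2) 0 ≤ T from hgt)]
    obtain ⟨i1, i2, i3, i4⟩ := ih (by omega) (by omega)
    rw [show mid = (lo + hi) / 2 from rfl] at i1 i2 i3 i4
    refine ⟨i1, by omega, i3, ?_⟩
    intro j hj1 hj2
    by_cases hj : j < mid
    · exact i4 j hj1 hj
    · have : crew.getD mid 0 ≤ crew.getD j 0 := hmono mid j (by omega) (by omega)
      exact lt_of_lt_of_le (not_le.mp hgt) this
  | case3 lo hi h =>
    intro h1 h2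
    rw [pvBisect]
    simp only [dif_neg h]
    exact ⟨le_refl _, by omega, by intro j hj1 hj2; omega, by intro j hj1 hj2; omega⟩

theorem pvBisect_eq (crew : List Int) (T : Int)
    (hmono : ∀ i j, i ≤ j → j < crew.length → crew.getD i 0 ≤ crew.getD j 0)
    (k : Nat) (hk : k ≤ crew.length) :
    pvBisect crew T k crew.length = k + pvLB crew k T := by
  obtain ⟨i1, i2, i3, i4⟩ := pvBisect_spec crew T hmono k crew.length hk (le_refl _)
  set r := pvBisect crew T k crew.length with hr
  have hLle : pvLB crew k T ≤ crew.length - k := pvLB_le crew k T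
  rcases Nat.lt_trichotomy r (k + pvLB crew k T) with h | h | h
  · exfalso
    have hj : r - k < pvLB crew k T := by omega
    obtain ⟨hjl, hjv⟩ := pvLB_elem hj
    have := i4 (k + (r - k)) (by omega) (by omega)
    omega
  · exact h
  · exfalso
    have hlt : k + pvLB crew k T < crew.length := by omega
    have hv := pvLB_stop hlt
    have := i3 (k + pvLB crew k T) (by omega) (by omega)
    omega

theorem pvRunA_le (mm : Nat) (crew : List Int) :
    ∀ (Ts : List Int) (k : Nat), k ≤ crew.length → pvRunA mm crew Ts k ≤ crew.length := by
  intro Ts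
  induction Ts with
  | nil => intro k hk; simpa [pvRunA] using hk
  | cons T Ts ih =>
    intro k hk
    have h1 : pvLB crew k T ≤ crew.length - k := pvLB_le crew k T
    have : k + pvD mm crew k T ≤ crew.length := by
      have : pvD mm crew k T ≤ pvLB crew k T := Nat.min_le_right _ _
      omega
    simpa [pvRunA] using ih _ this

theorem foldB (crew : List Int) (t : Int) (mm : Nat)
    (hmono : ∀ i j, i ≤ j → j < crew.length → crew.getD i 0 ≤ crew.getD j 0) :
    ∀ (is : List Int) (k : Nat), k ≤ crew.length →
      is.foldl (fun k i => min (k + mm) (pvBisect crew (540 + t * i) k crew.length)) k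
        = pvRunA mm crew (is.map (fun i => 540 + t * i)) k := by
  intro is
  induction is with
  | nil => intro k hk; simp [pvRunA]
  | cons i is ih =>
    intro k hk
    have hb := pvBisect_eq crew (540 + t * i) hmono k hk
    have hstep : min (k + mm) (pvBisect crew (540 + t * i) k crew.length)
        = k + pvD mm crew k (540 + t * i) := by
      rw [hb, pvD, Nat.add_min_add_left]
    have h1 : pvLB crew k (540 + t * i) ≤ crew.length - k := pvLB_le crew k _
    have hk' : k + pvD mm crew k (540 + t * i) ≤ crew.length := by
      have : pvD mm crew k (540 + t * i) ≤ pvLB crew k (540 + t * i) := Nat.min_le_right _ _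
      omega
    simp only [List.foldl_cons, List.map_cons, pvRunA, hstep]
    exact ih _ hk'

theorem pvALoop_of_le {m : Int} {crew : List Int} {bus : List (Int × Int × Option Int)}
    {bi ci : Nat} (h : bus.length ≤ bi) : pvALoop m crew bus bi ci = bus := by
  rw [pvALoop]
  split <;> simp [h]

theorem stepA (m : Int) (crew : List Int) :
    ∀ ci (bus : List (Int × Int × Option Int)) bi T (cnt : Int) tag,
      bus[bi]? = some (T, cnt, tag) →
      pvALoop m crew bus bi ci
        = pvALoop m crew
            (bus.set bi (T, cnt + (min ((m - cnt).toNat) (pvLB crew ci T) : Nat),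
              if min ((m - cnt).toNat) (pvLB crew ci T) = 0 then tag
              else some (crew.getD (ci + min ((m - cnt).toNat) (pvLB crew ci T) - 1) 0)))
            (bi + 1) (ci + min ((m - cnt).toNat) (pvLB crew ci T)) := by
  intro ci
  induction hfuel : crew.length - ci using Nat.strong_induction_on generalizing ci with
  | _ fuel ih =>
  intro bus bi T cnt tag hbus
  have hbi : bi < bus.length := (List.getElem?_eq_some_iff.mp hbus).1
  by_cases hci : ci < crew.length
  · -- loop body runs
    have hget : bus[bi] = (T, cnt, tag) := by
      have := List.getElem?_eq_some_iff.mp hbus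
      obtain ⟨h', hv⟩ := this
      exact hv
    rw [pvALoop]
    rw [dif_pos hci, dif_neg (by omega)]
    simp only [hget]
    by_cases hcond : crew[ci] ≤ T ∧ cnt < m
    · rw [if_pos (by exact hcond)]
      -- d = d' + 1
      have hcd : crew.getD ci 0 = crew[ci] := List.getD_eq_getElem crew 0 hci
      have hLB : pvLB crew ci T = pvLB crew (ci + 1) T + 1 :=
        pvLB_cons hci (by rw [hcd]; exact hcond.1)
      have hmc : (m - cnt).toNat = (m - (cnt + 1)).toNat + 1 := by omega
      have hd : min ((m - cnt).toNat) (pvLB crew ci T)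
          = min ((m - (cnt + 1)).toNat) (pvLB crew (ci + 1) T) + 1 := by
        rw [hLB, hmc]; omega
      have ih' := ih (crew.length - (ci + 1)) (by omega) (ci + 1) rfl
        (bus.set bi (T, cnt + 1, some crew[ci])) bi T (cnt + 1) (some crew[ci])
        (by rw [List.getElem?_set_self (by omega)])
      rw [ih', List.set_set]
      have harg : ci + 1 + min ((m - (cnt + 1)).toNat) (pvLB crew (ci + 1) T)
          = ci + min ((m - cnt).toNat) (pvLB crew ci T) := by rw [hd]; omega
      have hent : ((T, cnt + 1 + (min ((m - (cnt + 1)).toNat) (pvLB crew (ci + 1) T) : Nat),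
            if min ((m - (cnt + 1)).toNat) (pvLB crew (ci + 1) T) = 0 then some crew[ci]
            else some (crew.getD (ci + 1 + min ((m - (cnt + 1)).toNat) (pvLB crew (ci + 1) T) - 1) 0))
            : Int × Int × Option Int)
          = (T, cnt + (min ((m - cnt).toNat) (pvLB crew ci T) : Nat),
            if min ((m - cnt).toNat) (pvLB crew ci T) = 0 then tag
            else some (crew.getD (ci + min ((m - cnt).toNat) (pvLB crew ci T) - 1) 0)) := by
        set d' := min ((m - (cnt + 1)).toNat) (pvLB crew (ci + 1) T) with hd'
        rw [hd]
        have h2 : cnt + 1 + (d' : Int) = cnt + ((d' + 1 : Nat) : Int) := by push_cast; ring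
        have h3 : (if d' = 0 then some crew[ci] else some (crew.getD (ci + 1 + d' - 1) 0))
            = (if d' + 1 = 0 then (tag : Option Int) else some (crew.getD (ci + (d' + 1) - 1) 0)) := by
          rw [if_neg (Nat.succ_ne_zero d')]
          by_cases h0 : d' = 0
          · rw [if_pos h0, h0]
            have he : ci + (0 + 1) - 1 = ci := by omega
            rw [he, hcd]
          · rw [if_neg h0]
            have he : ci + 1 + d' - 1 = ci + (d' + 1) - 1 := by omega
            rw [he]
        rw [h2, h3]
      rw [hent, harg]
    · rw [if_neg hcond]
      -- d = 0
      have hd0 : min ((m - cnt).toNat) (pvLB crew ci T) = 0 := by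
        rcases not_and_or.mp hcond with hc | hc
        · have hcd : crew.getD ci 0 = crew[ci] := List.getD_eq_getElem crew 0 hci
          have := pvLB_zero_of_gt hci (by rw [hcd]; exact not_le.mp hc)
          omega
        · have : (m - cnt).toNat = 0 := by omega
          omega
      rw [hd0]
      norm_num
      rw [← hget, List.set_getElem_self]
  · -- crew exhausted: both sides return their bus unchanged
    have hd0 : min ((m - cnt).toNat) (pvLB crew ci T) = 0 := by
      have := pvLB_zero_of_ge (crew := crew) (ci := ci) (T := T) (by omega)
      omega
    have hget : bus[bi] = (T, cnt, tag) := (List.getElem?_eq_some_iff.mp hbus).2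
    rw [pvALoop, dif_neg hci, hd0]
    rw [pvALoop, dif_neg (by omega)]
    norm_num
    rw [← hget, List.set_getElem_self]

theorem chainA (m : Int) (crew : List Int) :
    ∀ (Ts : List Int) (Tl : Int) (P : List (Int × Int × Option Int)) (ci : Nat),
      ∃ P' : List (Int × Int × Option Int), P'.length = P.length + Ts.length ∧
        pvALoop m crew (P ++ (Ts ++ [Tl]).map (fun T => (T, (0 : Int), (none : Option Int))))
            P.length ci
          = P' ++ [(Tl, ((pvD m.toNat crew (pvRunA m.toNat crew Ts ci) Tl : Nat) : Int),
              if pvD m.toNat crew (pvRunA m.toNat crew Ts ci) Tl = 0 then none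
              else some (crew.getD
                (pvRunA m.toNat crew Ts ci + pvD m.toNat crew (pvRunA m.toNat crew Ts ci) Tl - 1) 0))] := by
  intro Ts
  induction Ts with
  | nil =>
    intro Tl P ci
    refine ⟨P, by simp, ?_⟩
    have hbus : (P ++ ([Tl].map (fun T => (T, (0 : Int), (none : Option Int)))))[P.length]?
        = some (Tl, (0 : Int), (none : Option Int)) := by
      simp
    have hs := stepA m crew ci _ P.length Tl 0 none hbus
    rw [List.nil_append (as := [Tl])]
    rw [hs]
    simp only [List.map_cons, List.map_nil]
    have hset : (P ++ [((Tl, (0 : Int), (none : Option Int)))]).set P.length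
          (Tl, 0 + ((min ((m - 0).toNat) (pvLB crew ci Tl) : Nat) : Int),
            if min ((m - 0).toNat) (pvLB crew ci Tl) = 0 then none
            else some (crew.getD (ci + min ((m - 0).toNat) (pvLB crew ci Tl) - 1) 0))
        = P ++ [(Tl, ((min ((m - 0).toNat) (pvLB crew ci Tl) : Nat) : Int),
            if min ((m - 0).toNat) (pvLB crew ci Tl) = 0 then none
            else some (crew.getD (ci + min ((m - 0).toNat) (pvLB crew ci Tl) - 1) 0))] := by
      rw [List.set_append_right _ _ (le_refl _)]
      norm_num
    rw [hset]
    rw [pvALoop_of_le (by simp)]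
    have hm0 : (m - 0).toNat = m.toNat := by norm_num
    simp only [pvRunA, pvD, hm0]
  | cons T Ts ih =>
    intro Tl P ci
    have hbus : (P ++ (((T :: Ts) ++ [Tl]).map (fun T => (T, (0 : Int), (none : Option Int)))))[P.length]?
        = some (T, (0 : Int), (none : Option Int)) := by
      simp
    have hs := stepA m crew ci _ P.length T 0 none hbus
    have hm0 : (m - 0).toNat = m.toNat := by norm_num
    set d0 := min ((m - 0).toNat) (pvLB crew ci T) with hd0
    have hset : (P ++ (((T :: Ts) ++ [Tl]).map (fun T => (T, (0 : Int), (none : Option Int))))).set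
          P.length
          (T, 0 + ((d0 : Nat) : Int),
            if d0 = 0 then none else some (crew.getD (ci + d0 - 1) 0))
        = (P ++ [(T, ((d0 : Nat) : Int),
            if d0 = 0 then none else some (crew.getD (ci + d0 - 1) 0))])
          ++ ((Ts ++ [Tl]).map (fun T => (T, (0 : Int), (none : Option Int)))) := by
      rw [List.cons_append, List.map_cons]
      rw [List.set_append_right _ _ (le_refl _)]
      norm_num
    rw [hs, hset]
    have hlen : (P ++ [(T, ((d0 : Nat) : Int),
        if d0 = 0 then none else some (crew.getD (ci + d0 - 1) 0))]).length = P.length + 1 := by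
      simp
    rw [show P.length + 1 = (P ++ [(T, ((d0 : Nat) : Int),
        if d0 = 0 then none else some (crew.getD (ci + d0 - 1) 0))]).length from hlen.symm]
    obtain ⟨P', hP1, hP2⟩ := ih Tl (P ++ [(T, ((d0 : Nat) : Int),
        if d0 = 0 then none else some (crew.getD (ci + d0 - 1) 0))]) (ci + d0)
    refine ⟨P', by simp at hP1 ⊢; omega, ?_⟩
    rw [hP2]
    have hrun : pvRunA m.toNat crew (T :: Ts) ci = pvRunA m.toNat crew Ts (ci + d0) := by
      simp only [pvRunA, pvD, hd0, hm0]
    rw [hrun]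

-- A's last-bus readout equals B's closed form (1 ≤ m is Pre_'s positive capacity)
theorem condEq (crew : List Int) (m T : Int) (k : Nat) (hm : 1 ≤ m)
    (hk : k ≤ crew.length) :
    (if (if pvD m.toNat crew k T = 0 then (none : Option Int)
          else some (crew.getD (k + pvD m.toNat crew k T - 1) 0)) ≠ none ∧
        ((pvD m.toNat crew k T : Nat) : Int) = m then
      ((if pvD m.toNat crew k T = 0 then (none : Option Int)
          else some (crew.getD (k + pvD m.toNat crew k T - 1) 0)).getD 0) - 1
    else T)
    = (if min m (((k + pvLB crew k T : Nat) : Int) - (k : Int)) = m then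
        (PySem.List.pyGet? crew
          ((k : Int) + min m (((k + pvLB crew k T : Nat) : Int) - (k : Int)) - 1)).getD 0 - 1
      else T) := by
  have hLle : pvLB crew k T ≤ crew.length - k := pvLB_le crew k T
  have hcast : ((k + pvLB crew k T : Nat) : Int) - (k : Int) = (pvLB crew k T : Int) := by
    push_cast; ring
  rw [hcast]
  by_cases hfull : m ≤ (pvLB crew k T : Int)
  · have hd : pvD m.toNat crew k T = m.toNat := by
      simp only [pvD]; omega
    have hmin : min m ((pvLB crew k T : Int)) = m := min_eq_left hfull
    rw [hd, hmin, if_neg (by omega : ¬ m.toNat = 0), if_pos ⟨by simp, by omega⟩, if_pos (by simp)]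
    have hidx : (k : Int) + m - 1 = ((k + m.toNat - 1 : Nat) : Int) := by push_cast; omega
    have hlt : k + m.toNat - 1 < crew.length := by omega
    rw [hidx, PySem.List.pyGet?_natCast, List.getElem?_eq_getElem hlt, Option.getD_some,
      List.getD_eq_getElem crew 0 hlt, Option.getD_some]
  · have hd : pvD m.toNat crew k T = pvLB crew k T := by
      simp only [pvD]; omega
    rw [hd, if_neg (by rintro ⟨-, hc⟩; omega),
      if_neg (by intro hc; rw [min_eq_right (by omega)] at hc; omega)]

theorem pairwise_getD_mono {l : List Int} (hp : l.Pairwise (· ≤ ·)) :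
    ∀ i j, i ≤ j → j < l.length → l.getD i 0 ≤ l.getD j 0 := by
  intro i j hij hj
  rw [List.getD_eq_getElem l 0 (by omega), List.getD_eq_getElem l 0 hj]
  rcases Nat.eq_or_lt_of_le hij with rfl | hlt
  · exact le_refl _
  · exact List.pairwise_iff_getElem.mp hp i j (by omega) hj hlt

theorem solution_eq (n t m : Int) (timetable : List String) (hn : 1 ≤ n) (hm : 1 ≤ m) :
    solution n t m timetable = solution_alt n t m timetable := by
  unfold solution solution_alt
  dsimp only
  set crew := PySem.List.sorted (timetable.map pvParse) (fun x => x) with hcrew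
  have hmono : ∀ i j, i ≤ j → j < crew.length → crew.getD i 0 ≤ crew.getD j 0 :=
    pairwise_getD_mono (PySem.List.sorted_pairwise (timetable.map pvParse) (fun x => x))
  have hrange : PySem.List.pyRange 0 n = PySem.List.pyRange 0 (n - 1) ++ [n - 1] := by
    conv_lhs => rw [show n = n - 1 + 1 by ring]
    exact PySem.List.pyRange_one_succ_right (by omega)
  have hmap : (PySem.List.pyRange 0 n).map
        (fun i => (540 + t * i, (0 : Int), (none : Option Int)))
      = (((PySem.List.pyRange 0 (n - 1)).map (fun i => 540 + t * i)) ++ [540 + t * (n - 1)]).map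
        (fun T => (T, (0 : Int), (none : Option Int))) := by
    rw [hrange]
    simp [List.map_map, Function.comp]
  obtain ⟨P', hP1, hP2⟩ := chainA m crew
    ((PySem.List.pyRange 0 (n - 1)).map (fun i => 540 + t * i)) (540 + t * (n - 1)) [] 0
  simp only [List.nil_append, List.length_nil] at hP2
  have hfold := foldB crew t m.toNat hmono (PySem.List.pyRange 0 (n - 1)) 0 (Nat.zero_le _)
  set kl := pvRunA m.toNat crew ((PySem.List.pyRange 0 (n - 1)).map (fun i => 540 + t * i)) 0
    with hkldef
  have hklle : kl ≤ crew.length := pvRunA_le _ _ _ _ (Nat.zero_le _)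
  rw [hmap, hP2, hfold]
  rw [PySem.List.pyGet?_neg_one_append_singleton]
  simp only [Option.getD_some]
  rw [pvBisect_eq crew (540 + t * (n - 1)) hmono kl hklle]
  exact congrArg pvFmt (condEq crew m (540 + t * (n - 1)) kl hm hklle)

-- ===== VERDICT (by name: the statement is the Claim_ definition above) =====
theorem solution_spec : Claim_equal_solution := by
  intro n t m timetable _ hpre
  show solution n t m timetable = solution_alt n t m timetable
  exact solution_eq n t m timetable hpre.1 hpre.2.1
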